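-- pv_equiv track=rewrite | github.com/ovi054/solved_problems | 2025 06 June/2966 Divide Array Into Arrays With Max Difference.py | divideArray
-- ===== SOURCE A (Python) =====
-- from typing import List
--
-- def divideArray(nums: List[int], k: int) -> List[List[int]]:
--     nums = sorted(nums)
--
--     output = []
--     temp = []
--
--     for i in range(len(nums)):
--         temp.append(nums[i])
--         if len(temp)==3:
--             if temp[2]-temp[0]>k or temp[2]-temp[1]>k:
--                 return []
--             output.append(temp)
--             temp = []
--     return output
-- ===== SOURCE B (Python) =====
-- def divideArray(nums, k):
--     s = sorted(nums)
--     chunks = []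
--     i = 0
--     while i + 3 <= len(s):
--         chunks.append(s[i:i + 3])
--         i += 3
--     if all(c[2] - c[0] <= k for c in chunks):
--         return chunks
--     return []
-- ===== Notes on version B (the rewrite author's own statement) =====
-- stated objective: alternative
-- what changed: A interleaves accumulation and per-triple validation with an early return mid-scan; B first chunks the sorted list into triples by repeated slicing, then validates all chunks in one pass with a single first-to-last span check per chunk (sortedness makes A's second check redundant).
import Mathlib
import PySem

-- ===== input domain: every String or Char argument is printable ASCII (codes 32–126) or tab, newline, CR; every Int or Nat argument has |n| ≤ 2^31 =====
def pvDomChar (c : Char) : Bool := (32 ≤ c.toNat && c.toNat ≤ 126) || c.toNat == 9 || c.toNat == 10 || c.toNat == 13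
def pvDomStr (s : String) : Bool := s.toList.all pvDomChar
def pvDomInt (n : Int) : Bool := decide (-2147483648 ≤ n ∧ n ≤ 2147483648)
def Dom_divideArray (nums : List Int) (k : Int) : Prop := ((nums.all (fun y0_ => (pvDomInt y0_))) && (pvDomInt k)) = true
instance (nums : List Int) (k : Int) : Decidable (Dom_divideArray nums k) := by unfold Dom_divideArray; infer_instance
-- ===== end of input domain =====

-- B chunks the sorted list into triples first, then validates all chunks in one pass
-- with a single first-to-last span check (sortedness makes A's second check redundant);
-- A interleaves accumulation and validation with an early return. Alternative decomposition, same cost.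


-- ===== PORT A =====
-- the for-loop of A: state is (temp, output); an early 'return []' propagates as [].
def divideArrayGo (k : Int) : List Int → List Int → List (List Int) → List (List Int)
  | [], _temp, output => output
  | x :: xs, temp, output =>
      let temp' := temp ++ [x]
      if temp'.length = 3 then
        if temp'.getD 2 0 - temp'.getD 0 0 > k ∨ temp'.getD 2 0 - temp'.getD 1 0 > k then
          []
        else
          divideArrayGo k xs [] (output ++ [temp'])
      else
        divideArrayGo k xs temp' output

def divideArray (nums : List Int) (k : Int) : List (List Int) :=
  divideArrayGo k (PySem.List.sorted nums (fun x => x) false) [] []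

-- ===== PORT B =====
-- the while-loop of B: while i + 3 <= len(s): chunks.append(s[i:i+3]); i += 3
def chunkGo (s : List Int) (i : Nat) : List (List Int) :=
  if i + 3 ≤ s.length then
    PySem.List.slice s (some (i : Int)) (some ((i : Int) + 3)) :: chunkGo s (i + 3)
  else []
termination_by s.length - i

def divideArray_alt (nums : List Int) (k : Int) : List (List Int) :=
  let s := PySem.List.sorted nums (fun x => x) false
  let chunks := chunkGo s 0
  if chunks.all (fun c => decide (c.getD 2 0 - c.getD 0 0 ≤ k)) then chunks else []

-- ===== PRECONDITION & SPEC =====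
def Spec_divideArray (nums : List Int) (k : Int) (out : List (List Int)) : Prop := out = divideArray_alt nums k
instance (nums : List Int) (k : Int) (out : List (List Int)) : Decidable (Spec_divideArray nums k out) := by unfold Spec_divideArray; infer_instance

-- ===== CLAIM (what is proved, stated in full; the proofs are below) =====
def Claim_equal_divideArray : Prop := ∀ (nums : List Int) (k : Int), Dom_divideArray nums k → Spec_divideArray nums k (divideArray nums k)

-- ===== LEMMAS AND PROOFS =====

-- proof-only view of B's while-loop: peel triples structurally.
def chunk3 : List Int → List (List Int)
  | a :: b :: c :: rest => [a, b, c] :: chunk3 rest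
  | _ => []

theorem chunk3_eq_nil_of_short (xs : List Int) (h : xs.length < 3) : chunk3 xs = [] := by
  match xs with
  | [] => rfl
  | [_] => rfl
  | [_, _] => rfl
  | _ :: _ :: _ :: _ => exact absurd h (by simp)

theorem chunkGo_eq_chunk3 (s : List Int) (i : Nat) : chunkGo s i = chunk3 (s.drop i) := by
  fun_induction chunkGo s i with
  | case1 i h ih =>
      have hlen : 3 ≤ (s.drop i).length := by simp; omega
      obtain ⟨a, ta, ha⟩ := List.exists_cons_of_ne_nil (l := s.drop i) (by intro hn; rw [hn] at hlen; simp at hlen)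
      obtain ⟨b, tb, hb⟩ := List.exists_cons_of_ne_nil (l := ta)
        (by intro hn; rw [ha, hn] at hlen; simp at hlen)
      obtain ⟨c, tc, hc⟩ := List.exists_cons_of_ne_nil (l := tb)
        (by intro hn; rw [ha, hb, hn] at hlen; simp at hlen)
      have hd : s.drop i = a :: b :: c :: tc := by rw [ha, hb, hc]
      have hsl : PySem.List.slice s (some (i : Int)) (some ((i : Int) + 3)) = (s.drop i).take 3 := by
        have := PySem.List.slice_natCast_add (xs := s) (j := i) (n := 3)
        simpa using this
      rw [hsl, ih, hd]
      have : s.drop (i + 3) = tc := by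
        rw [← List.drop_drop, hd]; rfl
      rw [this, chunk3]
      rfl
  | case2 i h =>
      rw [chunk3_eq_nil_of_short]
      simp; omega

-- A's loop on a (≤)-sorted list equals "append all chunks if every chunk passes, else []".
theorem divideArrayGo_eq_chunk3 (k : Int) (s : List Int) (hs : s.Pairwise (· ≤ ·)) (acc : List (List Int)) :
    divideArrayGo k s [] acc =
      (if (chunk3 s).all (fun c => decide (c.getD 2 0 - c.getD 0 0 ≤ k)) then acc ++ chunk3 s else []) := by
  induction s using chunk3.induct generalizing acc with
  | case1 a b c rest ih =>
      rw [List.pairwise_cons] at hs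
      have hab : a ≤ b := hs.1 b (by simp)
      rw [List.pairwise_cons] at hs
      have hbc : b ≤ c := hs.2.1 c (by simp)
      have hrest : rest.Pairwise (· ≤ ·) := (List.pairwise_cons.mp hs.2.2).2
      by_cases h : c - a > k
      · simp [divideArrayGo, chunk3, h]; omega
      · have h2 : ¬ (c - b > k) := by omega
        simp only [divideArrayGo, List.nil_append, List.length_cons, List.length_nil]
        norm_num [h, h2]
        rw [ih hrest]
        have hca : c ≤ k + a := by omega
        simp [chunk3, hca]
  | case2 s h =>
      match s with
      | [] => simp [divideArrayGo, chunk3]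
      | [x] => simp [divideArrayGo, chunk3]
      | [x, y] => simp [divideArrayGo, chunk3]
      | a :: b :: c :: r => exact absurd rfl (h a b c r)

-- ===== VERDICT (by name: the statement is the Claim_ definition above) =====
theorem divideArray_spec : Claim_equal_divideArray := by
  intro nums k _hdom
  unfold Spec_divideArray divideArray divideArray_alt
  have hs := PySem.List.sorted_pairwise (xs := nums) (key := fun x : Int => x)
  rw [divideArrayGo_eq_chunk3 k _ hs []]
  simp [chunkGo_eq_chunk3]
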